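-- pv_equiv track=rewrite | github.com/Bharathi-vbr/AI-Incident-Commander | app/services/incident_service.py | _extract_recommended_remediation
-- ===== SOURCE A (Python) =====
-- def _extract_recommended_remediation(summary_text: str) -> str:
--     if not summary_text:
--         return "Continue monitoring key SLOs and keep incident mode at normal."
--
--     lines = [line.strip() for line in summary_text.splitlines() if line.strip()]
--     immediate_section = False
--     remediation_lines: list[str] = []
--
--     for line in lines:
--         lower_line = line.lower()
--         if "immediate" in lower_line and ("mitigation" in lower_line or "remediation" in lower_line):
--             immediate_section = True
--             continue
--
--         if immediate_section and (line.startswith("##") or line.startswith("5)") or "preventive" in lower_line):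
--             break
--
--         if immediate_section:
--             remediation_lines.append(line.lstrip("-• "))
--
--     if remediation_lines:
--         return " ".join(remediation_lines[:2])
--
--     return "Switch to normal mode, reduce traffic pressure, and validate recovery with p95/error-rate thresholds."
-- ===== SOURCE B (Python) =====
-- def _extract_recommended_remediation(summary_text: str) -> str:
--     if not summary_text:
--         return "Continue monitoring key SLOs and keep incident mode at normal."
--
--     def is_header(line: str) -> bool:
--         low = line.lower()
--         return "immediate" in low and ("mitigation" in low or "remediation" in low)
--
--     def is_stop(line: str) -> bool:
--         return line.startswith("##") or line.startswith("5)") or "preventive" in line.lower()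
--
--     lines = [line.strip() for line in summary_text.splitlines() if line.strip()]
--
--     header_idx = next((i for i, line in enumerate(lines) if is_header(line)), None)
--     if header_idx is None:
--         return "Switch to normal mode, reduce traffic pressure, and validate recovery with p95/error-rate thresholds."
--
--     rest = lines[header_idx + 1:]
--     # section ends at the first non-header line that matches a stop marker
--     stop = next((i for i, line in enumerate(rest) if not is_header(line) and is_stop(line)), len(rest))
--     gathered = [line.lstrip("-• ") for line in rest[:stop] if not is_header(line)]
--
--     if not gathered:
--         return "Switch to normal mode, reduce traffic pressure, and validate recovery with p95/error-rate thresholds."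
--     return " ".join(gathered[:2])
-- ===== Notes on version B (the rewrite author's own statement) =====
-- stated objective: alternative
-- what changed: Replaces A's single flag-toggling pass with an index-based decomposition: find the header line's index with a first-match scan, cut the tail at the first stop line, then filter/map that slice.
import Mathlib
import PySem

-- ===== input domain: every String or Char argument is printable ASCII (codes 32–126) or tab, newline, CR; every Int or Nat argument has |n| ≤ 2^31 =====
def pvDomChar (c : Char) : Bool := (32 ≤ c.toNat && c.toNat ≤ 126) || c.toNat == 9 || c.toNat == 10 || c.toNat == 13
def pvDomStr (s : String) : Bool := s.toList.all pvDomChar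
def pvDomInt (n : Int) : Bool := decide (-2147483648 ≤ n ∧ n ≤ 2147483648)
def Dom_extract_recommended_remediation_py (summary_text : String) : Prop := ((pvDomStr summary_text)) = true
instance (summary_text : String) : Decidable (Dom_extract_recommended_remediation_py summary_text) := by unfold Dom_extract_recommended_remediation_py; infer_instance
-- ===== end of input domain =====

-- B replaces A's flag-toggling pass with an index-based decomposition (find header index, cut at stop, filter/map the slice); same behaviour, same cost.

-- line.lstrip("-• "): drop leading chars from the set {'-', '•', ' '} — exact (Python lstrip(chars) drops leading chars in the set)
def pvLstripDash (l : String) : String := String.ofList (l.toList.dropWhile (fun c => c = '-' || c = '•' || c = ' '))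

-- ===== PORT A =====
-- A's loop: state = (immediate_section flag, accumulated remediation_lines); branches in A's order
def pvALoop : List String → Bool → List String → List String
  | [], _, acc => acc
  | l :: ls, flag, acc =>
    let low := PySem.Str.lower l
    if PySem.Str.isIn "immediate" low && (PySem.Str.isIn "mitigation" low || PySem.Str.isIn "remediation" low) then
      pvALoop ls true acc
    else if flag && (PySem.Str.startswith l "##" || PySem.Str.startswith l "5)" || PySem.Str.isIn "preventive" low) then
      acc
    else if flag then
      pvALoop ls flag (acc ++ [pvLstripDash l])
    else
      pvALoop ls flag acc

def extract_recommended_remediation_py (summary_text : String) : String :=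
  if summary_text = "" then
    "Continue monitoring key SLOs and keep incident mode at normal."
  else
    let lines := ((PySem.Str.splitlines summary_text).map PySem.Str.strip).filter (fun l => l ≠ "")
    let remediation_lines := pvALoop lines false []
    if remediation_lines ≠ [] then
      PySem.Str.join " " (remediation_lines.take 2)
    else
      "Switch to normal mode, reduce traffic pressure, and validate recovery with p95/error-rate thresholds."

-- ===== PORT B =====
def pvIsHeader (l : String) : Bool :=
  let low := PySem.Str.lower l
  PySem.Str.isIn "immediate" low && (PySem.Str.isIn "mitigation" low || PySem.Str.isIn "remediation" low)

def pvIsStop (l : String) : Bool :=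
  PySem.Str.startswith l "##" || PySem.Str.startswith l "5)" || PySem.Str.isIn "preventive" (PySem.Str.lower l)

def extract_recommended_remediation_py_alt (summary_text : String) : String :=
  if summary_text = "" then
    "Continue monitoring key SLOs and keep incident mode at normal."
  else
    let lines := ((PySem.Str.splitlines summary_text).map PySem.Str.strip).filter (fun l => l ≠ "")
    match lines.findIdx? pvIsHeader with
    | none => "Switch to normal mode, reduce traffic pressure, and validate recovery with p95/error-rate thresholds."
    | some i =>
      let rest := lines.drop (i + 1)
      let stop := (rest.findIdx? (fun l => !pvIsHeader l && pvIsStop l)).getD rest.length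
      let gathered := ((rest.take stop).filter (fun l => !pvIsHeader l)).map pvLstripDash
      if gathered = [] then
        "Switch to normal mode, reduce traffic pressure, and validate recovery with p95/error-rate thresholds."
      else
        PySem.Str.join " " (gathered.take 2)

-- ===== PRECONDITION & SPEC =====
def Spec_extract_recommended_remediation_py (summary_text : String) (out : String) : Prop := out = extract_recommended_remediation_py_alt summary_text
instance (summary_text : String) (out : String) : Decidable (Spec_extract_recommended_remediation_py summary_text out) := by unfold Spec_extract_recommended_remediation_py; infer_instance

-- ===== CLAIM (what is proved, stated in full; the proofs are below) =====
def Claim_equal_extract_recommended_remediation_py : Prop := ∀ (summary_text : String), Dom_extract_recommended_remediation_py summary_text → Spec_extract_recommended_remediation_py summary_text (extract_recommended_remediation_py summary_text)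

-- ===== LEMMAS AND PROOFS =====

-- B's "gathered" computation on the tail after the header
def pvGathered (rest : List String) : List String :=
  ((rest.take ((rest.findIdx? (fun l => !pvIsHeader l && pvIsStop l)).getD rest.length)).filter
      (fun l => !pvIsHeader l)).map pvLstripDash

lemma pvALoop_true (rest : List String) : ∀ acc, pvALoop rest true acc = acc ++ pvGathered rest := by
  induction rest with
  | nil => intro acc; simp [pvALoop, pvGathered]
  | cons l ls ih =>
    intro acc
    by_cases hh : pvIsHeader l = true
    · have : pvALoop (l :: ls) true acc = pvALoop ls true acc := by
        simp only [pvALoop]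
        rw [if_pos (by simpa [pvIsHeader] using hh)]
      rw [this, ih]
      congr 1
      rcases h' : ls.findIdx? (fun l => !pvIsHeader l && pvIsStop l) with _ | j <;>
        simp [pvGathered, List.findIdx?_cons, hh, h']
    · by_cases hs : pvIsStop l = true
      · have : pvALoop (l :: ls) true acc = acc := by
          simp only [pvALoop]
          rw [if_neg (by simpa [pvIsHeader] using hh), if_pos (by simpa [pvIsStop, hh] using hs)]
        rw [this]
        simp [pvGathered, List.findIdx?_cons, hh, hs]
      · have : pvALoop (l :: ls) true acc = pvALoop ls true (acc ++ [pvLstripDash l]) := by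
          simp only [pvALoop]
          rw [if_neg (by simpa [pvIsHeader] using hh),
              if_neg (by simpa [pvIsStop] using hs)]
          simp
        rw [this, ih]
        simp only [Bool.not_eq_true] at hh hs
        rcases h' : ls.findIdx? (fun l => !pvIsHeader l && pvIsStop l) with _ | j <;>
          simp [pvGathered, List.findIdx?_cons, hh, hs, h']

lemma pvALoop_false (lines : List String) : ∀ acc, pvALoop lines false acc =
    match lines.findIdx? pvIsHeader with
    | none => acc
    | some i => acc ++ pvGathered (lines.drop (i + 1)) := by
  induction lines with
  | nil => intro acc; simp [pvALoop]
  | cons l ls ih =>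
    intro acc
    by_cases hh : pvIsHeader l = true
    · have : pvALoop (l :: ls) false acc = pvALoop ls true acc := by
        simp only [pvALoop]
        rw [if_pos (by simpa [pvIsHeader] using hh)]
      rw [this, pvALoop_true]
      simp [List.findIdx?_cons, hh]
    · have : pvALoop (l :: ls) false acc = pvALoop ls false acc := by
        simp only [pvALoop]
        rw [if_neg (by simpa [pvIsHeader] using hh)]
        simp
      rw [this, ih]
      rcases h' : ls.findIdx? pvIsHeader with _ | j <;>
        simp [List.findIdx?_cons, hh, h']

lemma pvBranch (g : List String) (fb : String) :
    (if g ≠ [] then PySem.Str.join " " (g.take 2) else fb) =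
    (if g = [] then fb else PySem.Str.join " " (g.take 2)) := by
  by_cases hg : g = [] <;> simp [hg]

-- ===== VERDICT (by name: the statement is the Claim_ definition above) =====
theorem extract_recommended_remediation_py_spec : Claim_equal_extract_recommended_remediation_py := by
  intro s _
  unfold Spec_extract_recommended_remediation_py
  unfold extract_recommended_remediation_py extract_recommended_remediation_py_alt
  by_cases he : s = ""
  · simp [he]
  · rw [if_neg he, if_neg he]
    simp only [pvALoop_false]
    rcases h : (((PySem.Str.splitlines s).map PySem.Str.strip).filter (fun l => l ≠ "")).findIdx? pvIsHeader with _ | i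
    · simp
    · simp only [List.nil_append, pvGathered]
      exact pvBranch _ _
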